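-- pv_equiv track=rewrite | github.com/codewithEshaYoutube/Advent_of_Code_Competition | Day12/day12.py | mask_to_coords
-- ===== SOURCE A (Python) =====
-- def mask_to_coords(mask, width):
--     """Convert mask back to coords (for debugging)."""
--     coords = []
--     bit = 0
--     while mask:
--         if mask & 1:
--             r, c = divmod(bit, width)
--             coords.append((r, c))
--         mask >>= 1
--         bit += 1
--     return coords
-- ===== SOURCE B (Python) =====
-- def mask_to_coords(mask, width):
--     """Convert mask back to coords (for debugging).
--
--     Walks only the set bits: each step isolates the lowest set bit,
--     reads its position from bit_length, and clears it."""
--     coords = []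
--     while mask:
--         rest = mask & (mask - 1)   # mask with its lowest set bit cleared
--         lsb = mask - rest          # the lowest set bit itself
--         coords.append(divmod(lsb.bit_length() - 1, width))
--         mask = rest
--     return coords
-- ===== Notes on version B (the rewrite author's own statement) =====
-- stated objective: faster
-- what changed: Replaces the per-bit-position scan (shift by one, test bit 0, count positions) with a set-bit walk: each iteration isolates the lowest set bit via mask & (mask-1), reads its index from bit_length, and clears it, so only popcount(mask) iterations run.
import Mathlib
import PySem

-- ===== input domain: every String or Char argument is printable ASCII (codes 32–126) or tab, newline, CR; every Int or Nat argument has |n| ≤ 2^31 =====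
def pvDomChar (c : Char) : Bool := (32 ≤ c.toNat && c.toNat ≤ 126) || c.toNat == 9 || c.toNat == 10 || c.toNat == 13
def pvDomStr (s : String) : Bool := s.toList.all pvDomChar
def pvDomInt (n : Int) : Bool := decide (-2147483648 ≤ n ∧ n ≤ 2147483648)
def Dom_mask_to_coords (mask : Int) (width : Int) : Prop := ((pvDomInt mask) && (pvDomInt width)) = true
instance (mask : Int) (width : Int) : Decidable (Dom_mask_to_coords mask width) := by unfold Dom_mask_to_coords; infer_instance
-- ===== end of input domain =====

-- B walks only the set bits (clear-lowest-set-bit loop) instead of scanning every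
-- bit position: popcount(mask) iterations instead of bit_length(mask) (objective: faster).


-- ===== PORT A =====
-- A's while loop over a nonnegative mask; for mask ≥ 0, `mask & 1` is `m % 2` and
-- `mask >>= 1` is `m / 2` on the Nat m = mask.toNat (exact).  divmod(bit, width) is
-- (floordiv, mod); width ≠ 0 is required by Pre_ whenever the loop body reaches it.
def maskGoA (m : Nat) (bit : Int) (width : Int) : List (Int × Int) :=
  if _h : m = 0 then []
  else
    (if m % 2 = 1 then
        [(PySem.Int.floordiv bit width, PySem.Int.mod bit width)]
      else []) ++ maskGoA (m / 2) (bit + 1) width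
  termination_by m
  decreasing_by exact Nat.div_lt_self (Nat.pos_of_ne_zero _h) (by norm_num)

-- For mask < 0 Python A never terminates (`mask >>= 1` converges to -1); that case is
-- outside Pre_ and the port returns [] there only to be total.
def mask_to_coords (mask : Int) (width : Int) : List (Int × Int) :=
  if mask < 0 then [] else maskGoA mask.toNat 0 width

-- ===== PORT B =====
-- B's while loop: rest = mask & (mask-1), lsb = mask - rest, emit divmod(lsb.bit_length()-1, width),
-- mask = rest.  For mask ≥ 0 this is exact on the Nat m = mask.toNat (&&& is Python's &,
-- PySem.Int.bitLength is int.bit_length).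
def maskGoB (m : Nat) (width : Int) : List (Int × Int) :=
  if _h : m = 0 then []
  else
    let rest := m &&& (m - 1)
    let lsb := m - rest
    (PySem.Int.floordiv (((PySem.Int.bitLength (lsb : Int)) : Int) - 1) width,
      PySem.Int.mod (((PySem.Int.bitLength (lsb : Int)) : Int) - 1) width) :: maskGoB rest width
  termination_by m
  decreasing_by
    calc m &&& (m - 1) ≤ m - 1 := Nat.and_le_right
    _ < m := Nat.sub_lt (Nat.pos_of_ne_zero _h) (by norm_num)

-- For mask < 0 Python B never terminates either; [] only to be total (outside Pre_).
def mask_to_coords_alt (mask : Int) (width : Int) : List (Int × Int) :=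
  if mask < 0 then [] else maskGoB mask.toNat width

-- ===== PRECONDITION & SPEC =====
-- Exactly the inputs on which A returns: mask < 0 makes A's while loop run forever,
-- and mask > 0 with width = 0 reaches divmod(bit, 0) which raises ZeroDivisionError.
def Pre_mask_to_coords (mask : Int) (width : Int) : Prop :=
  0 ≤ mask ∧ (mask = 0 ∨ width ≠ 0)
instance (mask : Int) (width : Int) : Decidable (Pre_mask_to_coords mask width) := by
  unfold Pre_mask_to_coords; infer_instance
def pvWitness_mask_to_coords : Int × Int := (5, 2)

def Spec_mask_to_coords (mask : Int) (width : Int) (out : List (Int × Int)) : Prop := out = mask_to_coords_alt mask width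
instance (mask : Int) (width : Int) (out : List (Int × Int)) : Decidable (Spec_mask_to_coords mask width out) := by unfold Spec_mask_to_coords; infer_instance

-- ===== CLAIM (what is proved, stated in full; the proofs are below) =====
def Claim_equal_mask_to_coords : Prop := ∀ (mask : Int) (width : Int), Dom_mask_to_coords mask width → Pre_mask_to_coords mask width → Spec_mask_to_coords mask width (mask_to_coords mask width)

-- ===== LEMMAS AND PROOFS =====

-- Positions of the set bits of m, in increasing order (proof-side specification).
def setbits (m : Nat) : List Nat :=
  if _h : m = 0 then []
  else (if m % 2 = 1 then [0] else []) ++ (setbits (m / 2)).map (· + 1)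
  termination_by m
  decreasing_by exact Nat.div_lt_self (Nat.pos_of_ne_zero _h) (by norm_num)

theorem setbits_double (k : Nat) : setbits (2 * k) = (setbits k).map (· + 1) := by
  by_cases hk : k = 0
  · subst hk; rw [setbits]; simp
  · have h0 : ¬ (2 * k = 0) := by omega
    have h1 : ¬ ((2 * k) % 2 = 1) := by omega
    have h2 : (2 * k) / 2 = k := by omega
    rw [setbits]
    simp [h0, h2]

theorem and_pred_odd (a : Nat) : (2 * a + 1) &&& (2 * a) = 2 * a := by
  apply Nat.eq_of_testBit_eq
  intro i
  rw [Nat.testBit_and]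
  cases i with
  | zero => simp [Nat.testBit_zero]
  | succ j =>
      have h1 : (2 * a + 1) / 2 = a := by omega
      have h2 : (2 * a) / 2 = a := by omega
      simp [Nat.testBit_add_one, h1, h2]

theorem and_pred_even (k : Nat) (hk : 0 < k) :
    (2 * k) &&& (2 * k - 1) = 2 * (k &&& (k - 1)) := by
  apply Nat.eq_of_testBit_eq
  intro i
  rw [Nat.testBit_and]
  cases i with
  | zero => simp [Nat.testBit_zero]
  | succ j =>
      have h1 : (2 * k) / 2 = k := by omega
      have h2 : (2 * k - 1) / 2 = k - 1 := by omega
      have h3 : (2 * (k &&& (k - 1))) / 2 = k &&& (k - 1) := by omega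
      simp only [Nat.testBit_add_one, h1, h2, h3]
      rw [Nat.testBit_and]

theorem log2_two_mul (x : Nat) (hx : 0 < x) : Nat.log2 (2 * x) = Nat.log2 x + 1 := by
  rw [Nat.log2_def]
  have h2 : 2 ≤ 2 * x := by omega
  have h3 : (2 * x) / 2 = x := by omega
  simp [h2, h3]

theorem bitLength_eq_log2 (x : Nat) (hx : 0 < x) :
    PySem.Int.bitLength (x : Int) = Nat.log2 x + 1 := by
  induction x using Nat.strong_induction_on with
  | _ x ih =>
    by_cases h2 : 2 ≤ x
    · rw [PySem.Int.bitLength_natCast hx, ih (x / 2) (by omega) (by omega)]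
      conv_rhs => rw [Nat.log2_def]
      simp [h2]
    · have hx1 : x = 1 := by omega
      subst hx1; decide

-- head/tail decomposition of setbits along the lowest set bit
theorem setbits_lsb (m : Nat) (hm : 0 < m) :
    setbits m = Nat.log2 (m - (m &&& (m - 1))) :: setbits (m &&& (m - 1)) := by
  induction m using Nat.strong_induction_on with
  | _ m ih =>
    by_cases hpar : m % 2 = 1
    · -- odd: m = 2*a + 1, rest = 2*a, lsb = 1
      have hm2 : m = 2 * (m / 2) + 1 := by omega
      rw [hm2]
      have hpred : 2 * (m / 2) + 1 - 1 = 2 * (m / 2) := by omega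
      rw [hpred, and_pred_odd]
      have hsub : 2 * (m / 2) + 1 - 2 * (m / 2) = 1 := by omega
      rw [hsub]
      have hlog : Nat.log2 1 = 0 := by decide
      rw [hlog, setbits]
      have h0 : ¬ (2 * (m / 2) + 1 = 0) := by omega
      have h1 : (2 * (m / 2) + 1) % 2 = 1 := by omega
      have h2 : (2 * (m / 2) + 1) / 2 = m / 2 := by omega
      simp only [h0, dite_false, h1, if_true, h2, ← setbits_double]
      simp
    · -- even: m = 2*k, k > 0
      have hk0 : 0 < m / 2 := by omega
      have hm2 : m = 2 * (m / 2) := by omega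
      rw [hm2]
      have hrest := and_pred_even (m / 2) hk0
      rw [hrest]
      have hlt : (m / 2) &&& (m / 2 - 1) < m / 2 := by
        have := @Nat.and_le_right (m / 2) (m / 2 - 1)
        omega
      have ihk := ih (m / 2) (by omega) hk0
      have hsub : 2 * (m / 2) - 2 * ((m / 2) &&& (m / 2 - 1)) =
          2 * ((m / 2) - ((m / 2) &&& (m / 2 - 1))) := by omega
      have hlsb0 : 0 < (m / 2) - ((m / 2) &&& (m / 2 - 1)) := by omega
      rw [hsub, setbits_double, ihk, log2_two_mul _ hlsb0, List.map_cons, ← setbits_double]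

theorem maskGoA_eq_map (m : Nat) (width : Int) : ∀ bit : Int,
    maskGoA m bit width =
      (setbits m).map (fun i : Nat =>
        (PySem.Int.floordiv (bit + (i : Int)) width, PySem.Int.mod (bit + (i : Int)) width)) := by
  induction m using Nat.strong_induction_on with
  | _ m ih =>
    intro bit
    by_cases h : m = 0
    · subst h; rw [maskGoA, setbits]; simp
    · rw [maskGoA, setbits]
      have hdiv : m / 2 < m := Nat.div_lt_self (Nat.pos_of_ne_zero h) (by norm_num)
      rw [ih (m / 2) hdiv (bit + 1)]
      simp only [h, dite_false, List.map_append, List.map_map]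
      congr 1
      · split_ifs <;> simp
      · apply List.map_congr_left
        intro i _
        simp only [Function.comp_apply]
        have hc : ((i + 1 : Nat) : Int) = (i : Int) + 1 := by push_cast; ring
        rw [hc]
        ring_nf

theorem maskGoB_eq_map (m : Nat) (width : Int) :
    maskGoB m width =
      (setbits m).map (fun i : Nat =>
        (PySem.Int.floordiv ((i : Int)) width, PySem.Int.mod ((i : Int)) width)) := by
  induction m using Nat.strong_induction_on with
  | _ m ih =>
    by_cases h : m = 0
    · subst h; rw [maskGoB, setbits]; simp
    · rw [maskGoB]
      have hrest_lt : m &&& (m - 1) < m := by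
        have := @Nat.and_le_right m (m - 1)
        omega
      have hlsb0 : 0 < m - (m &&& (m - 1)) := by omega
      rw [setbits_lsb m (Nat.pos_of_ne_zero h)]
      simp only [h, dite_false, List.map_cons]
      rw [ih (m &&& (m - 1)) hrest_lt]
      congr 2 <;>
      · rw [bitLength_eq_log2 _ hlsb0]
        push_cast
        ring_nf

-- ===== VERDICT (by name: the statement is the Claim_ definition above) =====
theorem mask_to_coords_spec : Claim_equal_mask_to_coords := by
  intro mask width _ hpre
  unfold Pre_mask_to_coords at hpre
  unfold Spec_mask_to_coords mask_to_coords mask_to_coords_alt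
  have hnn : ¬ mask < 0 := by omega
  simp only [hnn, if_false]
  rw [maskGoA_eq_map, maskGoB_eq_map]
  simp
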